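-- pv_equiv track=rewrite | github.com/ark2016/VK-Technopark-project-2024 | data_mining/tests/functions/file_701_720.py | choose_most_frequent
-- ===== SOURCE A (Python) =====
-- def choose_most_frequent(arr):
--     freq = {}
--     for elem in arr:
--         if elem in freq:
--             freq[elem] += 1
--         else:
--             freq[elem] = 1
--     max_count = 0
--     most_frequent = None
--     for key, value in freq.items():
--         if value > max_count:
--             most_frequent = key
--             max_count = value
--         elif value == max_count:
--             if key > most_frequent:
--                 most_frequent = key
--     return most_frequent
-- ===== SOURCE B (Python) =====
-- def choose_most_frequent(arr):
--     freq = {}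
--     max_count = 0
--     most_frequent = None
--     for elem in arr:
--         c = freq.get(elem, 0) + 1
--         freq[elem] = c
--         if c > max_count:
--             most_frequent = elem
--             max_count = c
--         elif c == max_count and elem > most_frequent:
--             most_frequent = elem
--     return most_frequent
-- ===== Notes on version B (the rewrite author's own statement) =====
-- stated objective: alternative
-- what changed: A builds the whole frequency dict in one loop and then scans freq.items() in a second loop to pick the most frequent key (ties to the larger key); B makes a single pass over arr, updating the count of the current element and the running (max_count, most_frequent) best at the same time, so the items() scan disappears.
import Mathlib
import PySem

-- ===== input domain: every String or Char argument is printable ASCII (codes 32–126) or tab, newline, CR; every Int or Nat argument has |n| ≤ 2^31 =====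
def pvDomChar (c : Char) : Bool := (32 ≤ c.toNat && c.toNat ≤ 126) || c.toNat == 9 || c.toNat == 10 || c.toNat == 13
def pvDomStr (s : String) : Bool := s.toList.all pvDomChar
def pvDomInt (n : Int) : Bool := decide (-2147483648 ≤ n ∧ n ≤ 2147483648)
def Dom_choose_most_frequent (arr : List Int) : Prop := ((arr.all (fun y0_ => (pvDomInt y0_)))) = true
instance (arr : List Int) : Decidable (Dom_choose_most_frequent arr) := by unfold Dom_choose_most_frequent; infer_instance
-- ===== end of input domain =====

-- B replaces A's two passes (build the whole frequency dict, then scan freq.items() for the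
-- most frequent key, ties to the larger key) by a single pass over arr that maintains the
-- running best alongside the counts (objective: alternative single-pass decomposition).

-- ===== PORT A =====
-- A's elif compares 'key > most_frequent' where most_frequent may be None; that branch is only
-- reachable with value == max_count >= 1, so most_frequent is already set — the 'none' arm below
-- (where Python would raise TypeError) is unreachable.

def pyGtOpt (k : Int) (mf : Option Int) : Bool :=
  match mf with
  | some m => k > m
  | none => false

def chooseStepA (st : Int × Option Int) (p : Int × Int) : Int × Option Int :=
  if p.2 > st.1 then (p.2, some p.1)
  else if p.2 = st.1 then (if pyGtOpt p.1 st.2 then (st.1, some p.1) else st)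
  else st

def choose_most_frequent (arr : List Int) : Option Int :=
  ((arr.foldl (fun d e => if d.contains e then d.insert e (d.getD e 0 + 1) else d.insert e 1)
      PySem.Dict.empty).items.foldl chooseStepA (0, none)).2

-- ===== PORT B =====
def chooseStepB (st : PySem.Dict Int Int × Int × Option Int) (e : Int) :
    PySem.Dict Int Int × Int × Option Int :=
  let c := st.1.getD e 0 + 1
  let d := st.1.insert e c
  if c > st.2.1 then (d, c, some e)
  else if c = st.2.1 ∧ pyGtOpt e st.2.2 then (d, st.2.1, some e)
  else (d, st.2.1, st.2.2)

def choose_most_frequent_alt (arr : List Int) : Option Int :=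
  (arr.foldl chooseStepB (PySem.Dict.empty, 0, none)).2.2

-- ===== PRECONDITION & SPEC =====
def Spec_choose_most_frequent (arr : List Int) (out : Option Int) : Prop := out = choose_most_frequent_alt arr
instance (arr : List Int) (out : Option Int) : Decidable (Spec_choose_most_frequent arr out) := by unfold Spec_choose_most_frequent; infer_instance

-- ===== CLAIM (what is proved, stated in full; the proofs are below) =====
def Claim_equal_choose_most_frequent : Prop := ∀ (arr : List Int), Dom_choose_most_frequent arr → Spec_choose_most_frequent arr (choose_most_frequent arr)

-- ===== LEMMAS AND PROOFS =====

-- Best-so-far state over the raw list xs: the count is the maximal multiplicity in xs and the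
-- element is the largest key attaining it (none exactly when xs is empty).
def Pbest (xs : List Int) (st : Int × Option Int) : Prop :=
  match st.2 with
  | none => xs = [] ∧ st.1 = 0
  | some k => k ∈ xs ∧ st.1 = (xs.count k : Int) ∧
      ∀ j ∈ xs, (xs.count j : Int) < st.1 ∨ ((xs.count j : Int) = st.1 ∧ j ≤ k)

-- The same characterization over a key/value items list, for A's second loop.

def Qbest (l : List (Int × Int)) (st : Int × Option Int) : Prop :=
  match st.2 with
  | none => l = [] ∧ st.1 = 0
  | some k => (k, st.1) ∈ l ∧ ∀ p ∈ l, p.2 < st.1 ∨ (p.2 = st.1 ∧ p.1 ≤ k)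


theorem Qbest_step (l : List (Int × Int)) (st : Int × Option Int) (k v : Int)
    (hst : Qbest l st) (hv : 1 ≤ v) : Qbest (l ++ [(k, v)]) (chooseStepA st (k, v)) := by
  rcases st with ⟨mc, mf⟩
  cases mf with
  | none =>
    rcases hst with ⟨hnil, hmc⟩
    subst hnil; subst hmc
    have h1 : v > 0 := by omega
    simp only [chooseStepA, h1, if_pos, List.nil_append, Qbest]
    exact ⟨by simp, by intro p hp; simp at hp; subst hp; right; exact ⟨rfl, le_refl _⟩⟩
  | some m =>
    rcases hst with ⟨hmem, hall⟩
    unfold chooseStepA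
    by_cases h1 : v > mc
    · simp only [h1, if_pos, Qbest]
      refine ⟨by simp, ?_⟩
      intro p hp
      rcases List.mem_append.1 hp with hp | hp
      · left
        rcases hall p hp with h | h <;> omega
      · rw [List.mem_singleton.1 hp]; right; exact ⟨rfl, le_refl _⟩
    · simp only [if_neg h1]
      by_cases h2 : v = mc
      · subst h2
        simp only [pyGtOpt]
        by_cases h3 : k > m
        · simp only [h3, decide_true, if_pos, Qbest]
          refine ⟨by simp, ?_⟩
          intro p hp
          rcases List.mem_append.1 hp with hp | hp
          · rcases hall p hp with h | h
            · left; exact h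
            · right; exact ⟨h.1, le_of_lt (lt_of_le_of_lt h.2 h3)⟩
          · rw [List.mem_singleton.1 hp]; right; exact ⟨rfl, le_refl _⟩
        · simp only [h3, decide_false, Bool.false_eq_true, Qbest]
          refine ⟨List.mem_append_left _ hmem, ?_⟩
          intro p hp
          rcases List.mem_append.1 hp with hp | hp
          · exact hall p hp
          · rw [List.mem_singleton.1 hp]; right; exact ⟨rfl, by omega⟩
      · simp only [if_neg h2, Qbest]
        refine ⟨List.mem_append_left _ hmem, ?_⟩
        intro p hp
        rcases List.mem_append.1 hp with hp | hp
        · exact hall p hp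
        · rw [List.mem_singleton.1 hp]; left; omega


theorem Qbest_fold (l : List (Int × Int)) (hl : ∀ p ∈ l, 1 ≤ p.2) :
    Qbest l (l.foldl chooseStepA (0, none)) := by
  induction l using List.reverseRecOn with
  | nil => exact ⟨rfl, rfl⟩
  | append_singleton l q ih =>
    rw [List.foldl_append, List.foldl_cons, List.foldl_nil]
    rcases q with ⟨k, v⟩
    exact Qbest_step l _ k v (ih (fun q hq => hl q (List.mem_append_left _ hq)))
      (hl (k, v) (List.mem_append_right _ (by simp)))


theorem Pbest_step (p : List Int) (mc : Int) (mf : Option Int) (x : Int)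
    (hst : Pbest p (mc, mf)) :
    Pbest (p ++ [x])
      (if ((p.count x : Int) + 1) > mc then (((p.count x : Int) + 1), some x)
       else if ((p.count x : Int) + 1) = mc ∧ pyGtOpt x mf then (mc, some x)
       else (mc, mf)) := by
  have hcnt : ∀ j : Int, j ≠ x → ((p ++ [x]).count j : Int) = (p.count j : Int) := by
    intro j hj
    rw [List.count_append]
    simp [show ¬x = j from fun h => hj h.symm]
  have hcx : ((p ++ [x]).count x : Int) = (p.count x : Int) + 1 := by
    rw [List.count_append]; simp
  cases mf with
  | none =>
    rcases hst with ⟨hnil, hmc⟩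
    subst hnil; subst hmc
    simp only [List.count_nil]
    norm_num
    simp only [Pbest]
    refine ⟨by simp, by simp, ?_⟩
    intro j hj
    simp at hj; subst hj
    right; simp
  | some m =>
    rcases hst with ⟨hm, hmc, hall⟩
    by_cases h1 : ((p.count x : Int) + 1) > mc
    · simp only [h1, if_pos, Pbest]
      refine ⟨List.mem_append_right _ (by simp), by rw [hcx], ?_⟩
      intro j hj
      by_cases hjx : j = x
      · subst hjx; right; exact ⟨hcx, le_refl _⟩
      · rw [hcnt j hjx]
        left
        have hjp : j ∈ p := by
          rcases List.mem_append.1 hj with h | h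
          · exact h
          · simp at h; exact absurd h hjx
        rcases hall j hjp with h | h <;> omega
    · simp only [if_neg h1]
      by_cases h2 : ((p.count x : Int) + 1) = mc ∧ pyGtOpt x (some m) = true
      · rcases h2 with ⟨h2, h3⟩
        simp only [pyGtOpt, decide_eq_true_eq] at h3
        simp only [h2, h3, pyGtOpt, decide_true, and_true, if_pos, Pbest]
        refine ⟨List.mem_append_right _ (by simp), by rw [hcx]; omega, ?_⟩
        intro j hj
        by_cases hjx : j = x
        · subst hjx; right; exact ⟨by rw [hcx]; omega, le_refl _⟩
        · rw [hcnt j hjx]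
          have hjp : j ∈ p := by
            rcases List.mem_append.1 hj with h | h
            · exact h
            · simp at h; exact absurd h hjx
          rcases hall j hjp with h | h
          · left; exact h
          · right; exact ⟨h.1, le_of_lt (lt_of_le_of_lt h.2 h3)⟩
      · rw [if_neg (by simpa using h2)]
        have hmx : m ≠ x := by
          intro h
          subst h
          omega
        simp only [Pbest]
        refine ⟨List.mem_append_left _ hm, by rw [hcnt m hmx]; exact hmc, ?_⟩
        intro j hj
        by_cases hjx : j = x
        · subst hjx
          rw [hcx]
          rcases not_and_or.1 h2 with h | h
          · left; omega
          · simp only [pyGtOpt, decide_eq_true_eq] at h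
            by_cases hce : ((p.count j : Int) + 1) = mc
            · right; exact ⟨by omega, by omega⟩
            · left; omega
        · rw [hcnt j hjx]
          have hjp : j ∈ p := by
            rcases List.mem_append.1 hj with h | h
            · exact h
            · simp at h; exact absurd h hjx
          exact hall j hjp


theorem A_dict_eq_counter (arr : List Int) :
    arr.foldl (fun d e => if d.contains e then d.insert e (d.getD e 0 + 1) else d.insert e 1)
      PySem.Dict.empty = PySem.Dict.counter arr := by
  have h : ∀ (d : PySem.Dict Int Int) (e : Int), e ∈ arr →
      (if d.contains e then d.insert e (d.getD e 0 + 1) else d.insert e 1)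
        = d.insert e (d.getD e 0 + 1) := by
    intro d e _
    by_cases hc : d.contains e
    · simp [hc]
    · rw [if_neg (by simpa using hc),
        PySem.Dict.getD_of_not_contains d 0 (by simpa using hc)]
      norm_num
  exact (PySem.List.foldl_congr_mem arr _ _ PySem.Dict.empty h).trans
    (PySem.Dict.foldl_insert_getD_add_one_eq_counter arr)


theorem mem_items_counter (arr : List Int) (p : Int × Int) :
    p ∈ (PySem.Dict.counter arr).items ↔ p.1 ∈ arr ∧ p.2 = (arr.count p.1 : Int) := by
  rw [PySem.Dict.items_counter]
  constructor
  · intro h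
    rcases List.mem_map.1 h with ⟨k, hk, hkp⟩
    rcases p with ⟨a, b⟩
    cases hkp
    exact ⟨(PySem.Set.mem_ofList _ _).1 hk, rfl⟩
  · rintro ⟨h1, h2⟩
    rcases p with ⟨a, b⟩
    exact List.mem_map.2 ⟨a, (PySem.Set.mem_ofList _ _).2 h1, by simp [h2.symm]⟩


theorem A_sound (arr : List Int) :
    Pbest arr ((PySem.Dict.counter arr).items.foldl chooseStepA (0, none)) := by
  have hq : Qbest (PySem.Dict.counter arr).items
      ((PySem.Dict.counter arr).items.foldl chooseStepA (0, none)) := by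
    apply Qbest_fold
    intro p hp
    rcases (mem_items_counter arr p).1 hp with ⟨h1, h2⟩
    have : 1 ≤ arr.count p.1 := List.one_le_count_iff.2 h1
    omega
  set st := (PySem.Dict.counter arr).items.foldl chooseStepA (0, none) with hstdef
  rcases st with ⟨mc, mf⟩
  cases mf with
  | none =>
    rcases hq with ⟨hnil, hmc⟩
    refine ⟨?_, hmc⟩
    by_contra hne
    rcases List.exists_mem_of_ne_nil arr hne with ⟨a, ha⟩
    have : ((a, (arr.count a : Int)) : Int × Int) ∈ (PySem.Dict.counter arr).items :=
      (mem_items_counter arr _).2 ⟨ha, rfl⟩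
    rw [hnil] at this
    simp at this
  | some k =>
    rcases hq with ⟨hmem, hall⟩
    rcases (mem_items_counter arr _).1 hmem with ⟨h1, h2⟩
    refine ⟨h1, h2, ?_⟩
    intro j hj
    simpa using hall (j, (arr.count j : Int)) ((mem_items_counter arr _).2 ⟨hj, rfl⟩)


theorem chooseStepB_eq (d : PySem.Dict Int Int) (mc : Int) (mf : Option Int) (e : Int) :
    chooseStepB (d, mc, mf) e =
      (d.insert e (d.getD e 0 + 1),
       if d.getD e 0 + 1 > mc then (d.getD e 0 + 1, some e)
       else if d.getD e 0 + 1 = mc ∧ pyGtOpt e mf then (mc, some e)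
       else (mc, mf)) := by
  unfold chooseStepB
  dsimp only
  split_ifs <;> rfl


theorem B_inv (arr : List Int) :
    (arr.foldl chooseStepB (PySem.Dict.empty, 0, none)).1 = PySem.Dict.counter arr ∧
    Pbest arr (arr.foldl chooseStepB (PySem.Dict.empty, 0, none)).2 := by
  induction arr using List.reverseRecOn with
  | nil => exact ⟨rfl, by simp [Pbest]⟩
  | append_singleton p x ih =>
    rw [List.foldl_append]
    rcases ih with ⟨hd, hb⟩
    rcases hfe : p.foldl chooseStepB (PySem.Dict.empty, 0, none) with ⟨d, mc, mf⟩
    rw [hfe] at hd hb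
    simp only at hd hb
    have hc : d.getD x 0 + 1 = (p.count x : Int) + 1 := by
      rw [hd, PySem.Dict.getD_counter]
    rw [List.foldl_cons, List.foldl_nil, chooseStepB_eq]
    constructor
    · show d.insert x (d.getD x 0 + 1) = _
      rw [hd]
      rw [show PySem.Dict.counter (p ++ [x]) = (PySem.Dict.counter p).modify x 0 (· + 1) by
        simp [PySem.Dict.counter_eq_foldl]]
      rfl
    · show Pbest (p ++ [x]) _
      rw [hc]
      exact Pbest_step p mc mf x hb


theorem Pbest_unique (xs : List Int) (s1 s2 : Int × Option Int)
    (h1 : Pbest xs s1) (h2 : Pbest xs s2) : s1.2 = s2.2 := by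
  rcases s1 with ⟨m1, f1⟩
  rcases s2 with ⟨m2, f2⟩
  cases f1 with
  | none =>
    cases f2 with
    | none => rfl
    | some k2 =>
      rw [h1.1] at h2
      simp [Pbest] at h2
  | some k1 =>
    cases f2 with
    | none =>
      rw [h2.1] at h1
      simp [Pbest] at h1
    | some k2 =>
      rcases h1 with ⟨hk1, e1, ha⟩
      rcases h2 with ⟨hk2, e2, hb⟩
      have h12 := ha k2 hk2
      have h21 := hb k1 hk1
      have : k1 = k2 := by
        simp only at h12 h21 e1 e2
        rcases h12 with h | h <;> rcases h21 with h' | h' <;> omega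
      simp [this]


-- ===== VERDICT (by name: the statement is the Claim_ definition above) =====
theorem choose_most_frequent_spec : Claim_equal_choose_most_frequent := by
  intro arr _
  unfold Spec_choose_most_frequent choose_most_frequent choose_most_frequent_alt
  rw [A_dict_eq_counter]
  exact Pbest_unique arr _ _ (A_sound arr) (B_inv arr).2
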